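-- pv_equiv track=rewrite | github.com/mithila442/argument-mining_iam | preprocess_cepe.py | validate_full_label
-- ===== SOURCE A (Python) =====
-- def validate_full_label(label):
--     """
--     Validate the format of full_label (e.g., 'C-index', 'E-B-index', 'E-I-index', 'O').
--     """
--     if label == 'O':
--         return label
--     if isinstance(label, str) and all(
--         part.startswith(('C-', 'E-B-', 'E-I-')) or part == 'O'
--         for part in label.split('|')
--     ):
--         return label
--     return None
-- ===== SOURCE B (Python) =====
-- def validate_full_label(label):
--     """
--     Validate the format of full_label (e.g., 'C-index', 'E-B-index', 'E-I-index', 'O')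
--     with a single left-to-right pass of a finite-state machine (no split, no per-part
--     prefix checks): states track how much of a segment head ('C-', 'E-B-', 'E-I-', 'O')
--     has been seen; '|' returns to the segment-start state.
--     """
--     if not isinstance(label, str):
--         return None
--     S, C1, E1, E2, E3, BODY, OSEEN, DEAD = range(8)
--     state = S
--     for ch in label:
--         if state == BODY:
--             state = S if ch == '|' else BODY
--         elif state == S:
--             state = C1 if ch == 'C' else E1 if ch == 'E' else OSEEN if ch == 'O' else DEAD
--         elif state == C1:
--             state = BODY if ch == '-' else DEAD
--         elif state == E1:
--             state = E2 if ch == '-' else DEAD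
--         elif state == E2:
--             state = E3 if ch in ('B', 'I') else DEAD
--         elif state == E3:
--             state = BODY if ch == '-' else DEAD
--         elif state == OSEEN:
--             state = S if ch == '|' else DEAD
--         else:
--             state = DEAD
--     return label if state in (BODY, OSEEN) else None
-- ===== Notes on version B (the rewrite author's own statement) =====
-- stated objective: alternative
-- what changed: Replaces A's separator-splitting step plus per-part startswith/equality checks by a single left-to-right pass of a hand-rolled finite-state machine (an explicit DFA for the label grammar) over the characters.
import Mathlib
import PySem

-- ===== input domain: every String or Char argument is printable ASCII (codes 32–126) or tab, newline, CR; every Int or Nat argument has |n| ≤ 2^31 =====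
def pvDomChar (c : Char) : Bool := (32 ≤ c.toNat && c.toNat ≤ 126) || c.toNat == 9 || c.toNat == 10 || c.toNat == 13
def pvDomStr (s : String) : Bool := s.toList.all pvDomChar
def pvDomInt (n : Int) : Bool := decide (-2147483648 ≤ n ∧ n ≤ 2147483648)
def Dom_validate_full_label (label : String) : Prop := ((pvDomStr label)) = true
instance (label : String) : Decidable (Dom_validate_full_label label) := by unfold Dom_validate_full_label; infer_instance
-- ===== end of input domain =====

-- B replaces A's separator-splitting plus per-part prefix checks by a single left-to-right pass of a
-- hand-rolled finite-state machine over the characters (idiomatic automaton matching).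

-- ===== PORT A =====
def validate_full_label (label : String) : Option String :=
  if label == "O" then some label
  else
    match PySem.Str.split? label "|" with
    | some parts =>
        if parts.all (fun part =>
            PySem.Str.startswith part "C-" || PySem.Str.startswith part "E-B-" ||
            PySem.Str.startswith part "E-I-" || part == "O")
        then some label else none
    | none => none  -- unreachable: the separator "|" is non-empty

-- ===== PORT B =====
inductive FsmState
  | s | c1 | e1 | e2 | e3 | body | oseen | dead
deriving DecidableEq, Repr

def fsmStep : FsmState → Char → FsmState
  | .body, ch => if ch = '|' then .s else .body
  | .s, ch => if ch = 'C' then .c1 else if ch = 'E' then .e1 else if ch = 'O' then .oseen else .dead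
  | .c1, ch => if ch = '-' then .body else .dead
  | .e1, ch => if ch = '-' then .e2 else .dead
  | .e2, ch => if ch = 'B' ∨ ch = 'I' then .e3 else .dead
  | .e3, ch => if ch = '-' then .body else .dead
  | .oseen, ch => if ch = '|' then .s else .dead
  | .dead, _ => .dead

def validate_full_label_alt (label : String) : Option String :=
  let final := label.toList.foldl fsmStep .s
  if final = .body ∨ final = .oseen then some label else none

-- ===== PRECONDITION & SPEC =====
def Spec_validate_full_label (label : String) (out : Option String) : Prop := out = validate_full_label_alt label
instance (label : String) (out : Option String) : Decidable (Spec_validate_full_label label out) := by unfold Spec_validate_full_label; infer_instance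

-- ===== CLAIM (what is proved, stated in full; the proofs are below) =====
def Claim_equal_validate_full_label : Prop := ∀ (label : String), Dom_validate_full_label label → Spec_validate_full_label label (validate_full_label label)

-- ===== LEMMAS AND PROOFS =====

-- spec-side split: pvParts l cur = the pieces of (cur.reverse ++ l) split on '|'
def pvParts : List Char → List Char → List (List Char)
  | [], cur => [cur.reverse]
  | c :: r, cur => if c = '|' then cur.reverse :: pvParts r [] else pvParts r (c :: cur)

def pvSegOk (p : List Char) : Bool :=
  PySem.Chars.startswith p ['C','-'] || PySem.Chars.startswith p ['E','-','B','-'] ||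
  PySem.Chars.startswith p ['E','-','I','-'] || p == ['O']

def pvInv : FsmState → List Char → Prop
  | .s, cur => cur = []
  | .c1, cur => cur = ['C']
  | .e1, cur => cur = ['E']
  | .e2, cur => cur = ['-','E']
  | .e3, cur => cur = ['B','-','E'] ∨ cur = ['I','-','E']
  | .body, cur => (PySem.Chars.startswith cur.reverse ['C','-'] ||
      PySem.Chars.startswith cur.reverse ['E','-','B','-'] ||
      PySem.Chars.startswith cur.reverse ['E','-','I','-']) = true
  | .oseen, cur => cur = ['O']
  | .dead, _ => False

lemma pvGo_eq : ∀ (fuel : Nat) (l cur : List Char) (acc : List (List Char)),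
    l.length < fuel →
    PySem.Chars.splitOn.go ['|'] fuel l cur acc = acc.reverse ++ pvParts l cur := by
  intro fuel
  induction fuel with
  | zero => intro l cur acc h; omega
  | succ fuel ih =>
    intro l cur acc h
    cases l with
    | nil => simp [PySem.Chars.splitOn.go, pvParts]
    | cons c r =>
      rw [PySem.Chars.splitOn.go]
      by_cases hc : c = '|'
      · subst hc
        have hpre : List.isPrefixOf ['|'] ('|' :: r) = true := by simp [List.isPrefixOf]
        simp only [hpre, if_pos, List.length_cons, List.length_nil, Nat.zero_add,
          List.drop_succ_cons, List.drop_zero]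
        rw [ih r [] (cur.reverse :: acc) (by simp at h; omega)]
        simp [pvParts]
      · have hpre : List.isPrefixOf ['|'] (c :: r) = false := by
          simp [List.isPrefixOf, Ne.symm hc]
        simp only [hpre, Bool.false_eq_true]
        rw [ih r (c :: cur) acc (by simp at h; omega)]
        simp [pvParts, hc]

lemma pvSplitOn_eq (l : List Char) : PySem.Chars.splitOn l ['|'] = pvParts l [] := by
  rw [PySem.Chars.splitOn, pvGo_eq (l.length + 1) l [] [] (by omega)]
  simp

lemma pvFoldl_dead : ∀ l : List Char, l.foldl fsmStep .dead = .dead := by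
  intro l; induction l with
  | nil => rfl
  | cons c r ih => simpa [fsmStep] using ih

lemma pvParts_dead : ∀ (l cur : List Char),
    (∀ ext : List Char, '|' ∉ ext → pvSegOk (cur.reverse ++ ext) = false) →
    (pvParts l cur).all pvSegOk = false := by
  intro l
  induction l with
  | nil =>
    intro cur h
    have := h [] (by simp)
    simpa [pvParts] using this
  | cons c r ih =>
    intro cur h
    by_cases hc : c = '|'
    · subst hc
      have h0 := h [] (by simp)
      simp only [List.append_nil] at h0
      simp [pvParts, List.all_cons, h0]
    · rw [pvParts, if_neg hc]
      apply ih
      intro ext hext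
      have := h (c :: ext) (by simp [hext, Ne.symm hc])
      simpa using this

lemma pvStartswith_ext (x y p : List Char) (h : PySem.Chars.startswith x p = true) :
    PySem.Chars.startswith (x ++ y) p = true := by
  simp only [PySem.Chars.startswith, List.isPrefixOf_iff_prefix] at *
  exact h.trans (List.prefix_append x y)

lemma pvMain : ∀ (l : List Char) (st : FsmState) (cur : List Char), pvInv st cur →
    ((l.foldl fsmStep st = .body ∨ l.foldl fsmStep st = .oseen) ↔ (pvParts l cur).all pvSegOk = true) := by
  intro l
  induction l with
  | nil =>
    intro st cur hinv
    cases st <;> simp only [pvInv] at hinv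
    · subst hinv; simp [pvParts]; try decide
    · subst hinv; simp [pvParts]; try decide
    · subst hinv; simp [pvParts]; try decide
    · subst hinv; simp [pvParts]; try decide
    · rcases hinv with h | h <;> (subst h; simp [pvParts]; try decide)
    · simp [pvParts, pvSegOk, hinv]
    · subst hinv; simp [pvParts]; try decide
  | cons c r ih =>
    intro st cur hinv
    rw [List.foldl_cons]
    have hdead : ∀ (cur' : List Char),
        (∀ ext : List Char, '|' ∉ ext → pvSegOk (cur'.reverse ++ ext) = false) →
        ((r.foldl fsmStep .dead = .body ∨ r.foldl fsmStep .dead = .oseen) ↔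
          (pvParts r cur').all pvSegOk = true) := by
      intro cur' h
      rw [pvFoldl_dead, pvParts_dead r cur' h]
      simp
    cases st <;> simp only [pvInv] at hinv
    -- s
    · subst hinv
      by_cases hC : c = 'C'
      · subst hC
        rw [show fsmStep .s 'C' = .c1 from rfl, pvParts, if_neg (by decide)]
        exact ih .c1 ['C'] rfl
      by_cases hE : c = 'E'
      · subst hE
        rw [show fsmStep .s 'E' = .e1 from rfl, pvParts, if_neg (by decide)]
        exact ih .e1 ['E'] rfl
      by_cases hO : c = 'O'
      · subst hO
        rw [show fsmStep .s 'O' = .oseen from rfl, pvParts, if_neg (by decide)]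
        exact ih .oseen ['O'] rfl
      by_cases hB : c = '|'
      · subst hB
        rw [show fsmStep .s '|' = .dead from rfl, pvParts, if_pos rfl, pvFoldl_dead]
        simp [List.all_cons, show pvSegOk [] = false from by decide]
      · rw [show fsmStep .s c = .dead from by simp [fsmStep, hC, hE, hO], pvParts, if_neg hB]
        apply hdead
        intro ext hext
        simp [pvSegOk, PySem.Chars.startswith, List.isPrefixOf, Ne.symm hC, Ne.symm hE]
        exact fun h => absurd h hO
    -- c1
    · subst hinv
      by_cases hd : c = '-'
      · subst hd
        rw [show fsmStep .c1 '-' = .body from rfl, pvParts, if_neg (by decide)]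
        exact ih .body ['-','C'] rfl
      by_cases hB : c = '|'
      · subst hB
        rw [show fsmStep .c1 '|' = .dead from rfl, pvParts, if_pos rfl, pvFoldl_dead]
        simp [List.all_cons, show pvSegOk ['C'] = false from by decide]
      · rw [show fsmStep .c1 c = .dead from by simp [fsmStep, hd], pvParts, if_neg hB]
        apply hdead
        intro ext hext
        simp [pvSegOk, PySem.Chars.startswith, List.isPrefixOf, Ne.symm hd]
    -- e1
    · subst hinv
      by_cases hd : c = '-'
      · subst hd
        rw [show fsmStep .e1 '-' = .e2 from rfl, pvParts, if_neg (by decide)]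
        exact ih .e2 ['-','E'] rfl
      by_cases hB : c = '|'
      · subst hB
        rw [show fsmStep .e1 '|' = .dead from rfl, pvParts, if_pos rfl, pvFoldl_dead]
        simp [List.all_cons, show pvSegOk ['E'] = false from by decide]
      · rw [show fsmStep .e1 c = .dead from by simp [fsmStep, hd], pvParts, if_neg hB]
        apply hdead
        intro ext hext
        simp [pvSegOk, PySem.Chars.startswith, List.isPrefixOf, Ne.symm hd]
    -- e2
    · subst hinv
      by_cases hb : c = 'B'
      · subst hb
        rw [show fsmStep .e2 'B' = .e3 from by simp [fsmStep], pvParts, if_neg (by decide)]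
        exact ih .e3 ['B','-','E'] (Or.inl rfl)
      by_cases hi : c = 'I'
      · subst hi
        rw [show fsmStep .e2 'I' = .e3 from by simp [fsmStep], pvParts, if_neg (by decide)]
        exact ih .e3 ['I','-','E'] (Or.inr rfl)
      by_cases hB : c = '|'
      · subst hB
        rw [show fsmStep .e2 '|' = .dead from by simp [fsmStep], pvParts, if_pos rfl, pvFoldl_dead]
        simp [List.all_cons, show pvSegOk ['E','-'] = false from by decide]
      · rw [show fsmStep .e2 c = .dead from by simp [fsmStep, hb, hi], pvParts, if_neg hB]
        apply hdead
        intro ext hext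
        simp [pvSegOk, PySem.Chars.startswith, List.isPrefixOf, Ne.symm hb, Ne.symm hi]
    -- e3
    · by_cases hd : c = '-'
      · subst hd
        rw [show fsmStep .e3 '-' = .body from rfl, pvParts, if_neg (by decide)]
        rcases hinv with h | h <;> subst h
        · exact ih .body ['-','B','-','E'] rfl
        · exact ih .body ['-','I','-','E'] rfl
      by_cases hB : c = '|'
      · subst hB
        rw [show fsmStep .e3 '|' = .dead from rfl, pvParts, if_pos rfl, pvFoldl_dead]
        rcases hinv with h | h <;> subst h
        · simp [List.all_cons, show pvSegOk ['E','-','B'] = false from by decide]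
        · simp [List.all_cons, show pvSegOk ['E','-','I'] = false from by decide]
      · rw [show fsmStep .e3 c = .dead from by simp [fsmStep, hd], pvParts, if_neg hB]
        apply hdead
        intro ext hext
        rcases hinv with h | h <;> subst h <;>
          simp [pvSegOk, PySem.Chars.startswith, List.isPrefixOf, Ne.symm hd]
    -- body
    · by_cases hB : c = '|'
      · subst hB
        rw [show fsmStep .body '|' = .s from rfl, pvParts, if_pos rfl]
        have hok : pvSegOk cur.reverse = true := by
          rcases Bool.or_eq_true_iff.mp hinv with h | h
          · rcases Bool.or_eq_true_iff.mp h with h' | h' <;> simp [pvSegOk, h']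
          · simp [pvSegOk, h]
        rw [List.all_cons, hok, Bool.true_and]
        exact ih .s [] rfl
      · rw [show fsmStep .body c = .body from by simp [fsmStep, hB], pvParts, if_neg hB]
        apply ih .body (c :: cur)
        simp only [pvInv, List.reverse_cons]
        rcases Bool.or_eq_true_iff.mp hinv with h | h
        · rcases Bool.or_eq_true_iff.mp h with h' | h'
          · simp [pvStartswith_ext _ [c] _ h']
          · simp [pvStartswith_ext _ [c] _ h']
        · simp [pvStartswith_ext _ [c] _ h]
    -- oseen
    · subst hinv
      by_cases hB : c = '|'
      · subst hB
        rw [show fsmStep .oseen '|' = .s from rfl, pvParts, if_pos rfl]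
        simp only [List.all_cons, List.reverse_singleton,
          show pvSegOk ['O'] = true from by decide, Bool.true_and]
        exact ih .s [] rfl
      · rw [show fsmStep .oseen c = .dead from by simp [fsmStep, hB], pvParts, if_neg hB]
        apply hdead
        intro ext hext
        simp [pvSegOk, PySem.Chars.startswith, List.isPrefixOf]

lemma pvBeqO (p : String) : (p == "O") = (p.toList == ['O']) := by
  by_cases hp : p = "O"
  · subst hp; decide
  · have h2 : p.toList ≠ ['O'] := fun h => hp (String.ext (by rw [h]; decide))
    simp [hp, h2]

lemma pvSplitSome (l : List Char) : PySem.Chars.split? l ['|'] = some (PySem.Chars.splitOn l ['|']) := by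
  simp [PySem.Chars.split?]

lemma pvSplitStr (label : String) :
    ∃ parts : List String, PySem.Str.split? label "|" = some parts ∧
      parts.map String.toList = pvParts label.toList [] := by
  have h := PySem.Str.split?_map label "|"
  rw [show ("|" : String).toList = ['|'] from by decide, pvSplitSome, pvSplitOn_eq] at h
  obtain ⟨parts, hp, hmap⟩ := Option.map_eq_some_iff.mp h
  exact ⟨parts, hp, hmap⟩

lemma pvPartOk (p : String) :
    (PySem.Str.startswith p "C-" || PySem.Str.startswith p "E-B-" ||
     PySem.Str.startswith p "E-I-" || (p == "O")) = pvSegOk p.toList := by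
  rw [pvBeqO, pvSegOk]
  simp only [PySem.Str.startswith_eq]
  rw [show ("C-" : String).toList = ['C','-'] from by decide,
      show ("E-B-" : String).toList = ['E','-','B','-'] from by decide,
      show ("E-I-" : String).toList = ['E','-','I','-'] from by decide]

-- ===== VERDICT (by name: the statement is the Claim_ definition above) =====
theorem validate_full_label_spec : Claim_equal_validate_full_label := by
  intro label _
  show validate_full_label label = validate_full_label_alt label
  by_cases hO : label = "O"
  · subst hO; decide
  · obtain ⟨parts, hp, hmap⟩ := pvSplitStr label
    have hall : parts.all (fun part =>
        PySem.Str.startswith part "C-" || PySem.Str.startswith part "E-B-" ||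
        PySem.Str.startswith part "E-I-" || (part == "O")) = (pvParts label.toList []).all pvSegOk := by
      rw [← hmap, List.all_map]
      exact congrArg parts.all (funext fun p => pvPartOk p)
    have hiff := pvMain label.toList .s [] rfl
    rw [validate_full_label, validate_full_label_alt, if_neg (by simpa using hO), hp]
    dsimp only
    split_ifs with h1 h2 h2
    · rfl
    · exact absurd (hiff.mpr (hall ▸ h1)) h2
    · exact absurd (hall ▸ hiff.mp h2).symm (by simpa using h1)
    · rfl
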